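-- pv_equiv track=rewrite | github.com/richedperson1/DSA | challeges/weekly gfg challenge/longest beutiful subarray.py | longest_beautiful_subarray
-- ===== SOURCE A (Python) =====
-- def longest_beautiful_subarray(arr):
--     n = len(arr)
--     prefix_xor = [0] * (n + 1)
--     xor_map = {}
--     max_len = 0
--
--     # Compute the prefix XOR array
--     for i in range(1, n + 1):
--         prefix_xor[i] = prefix_xor[i - 1] ^ arr[i - 1]
--
--     # Iterate through the prefix XOR array
--     for i in range(n + 1):
--         current_xor = prefix_xor[i]
--
--         if current_xor in xor_map:
--             # If this prefix XOR has been seen before, calculate the length of the subarray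
--             max_len = max(max_len, i - xor_map[current_xor])
--         else:
--             # Store the first occurrence of the prefix XOR
--             xor_map[current_xor] = i
--
--     return max_len
-- ===== SOURCE B (Python) =====
-- def longest_beautiful_subarray(arr):
--     pref = 0
--     k = 0
--     pairs = [(0, 0)]
--     for x in arr:
--         k += 1
--         pref ^= x
--         pairs.append((pref, k))
--     pairs.sort()
--     best = 0
--     run_start = 0
--     for t in range(1, len(pairs)):
--         if pairs[t][0] != pairs[run_start][0]:
--             run_start = t
--         else:
--             best = max(best, pairs[t][1] - pairs[run_start][1])
--     return best
-- ===== Notes on version B (the rewrite author's own statement) =====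
-- stated objective: alternative
-- what changed: B drops A's first-occurrence hash map and second scan: it builds (prefix XOR, index) pairs, sorts them lexicographically, and takes the largest index gap within each run of equal values.
import Mathlib
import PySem

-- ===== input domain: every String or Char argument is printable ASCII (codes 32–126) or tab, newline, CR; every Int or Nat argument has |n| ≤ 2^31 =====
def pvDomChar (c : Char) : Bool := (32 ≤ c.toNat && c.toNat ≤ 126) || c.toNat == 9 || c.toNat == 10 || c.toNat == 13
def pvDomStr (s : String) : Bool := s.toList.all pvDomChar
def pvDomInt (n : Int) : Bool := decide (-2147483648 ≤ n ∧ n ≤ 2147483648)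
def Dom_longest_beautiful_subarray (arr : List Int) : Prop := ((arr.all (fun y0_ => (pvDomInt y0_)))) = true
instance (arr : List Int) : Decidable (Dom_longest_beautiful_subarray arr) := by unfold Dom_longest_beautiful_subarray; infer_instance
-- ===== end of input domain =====

-- B replaces A's prefix-XOR array + first-occurrence map by sort-and-scan: it sorts the
-- (prefix XOR, index) pairs and takes, over each run of equal values, the largest index gap
-- (objective: alternative — a different algorithm, O(n log n) instead of O(n), no hash map).
-- ===== PORT A =====
-- All list indexing in A is provably in range, so getD transcribes arr[i-1]/prefix_xor[i] exactly.
def longest_beautiful_subarray (arr : List Int) : Int :=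
  let n := arr.length
  -- for i in range(1, n + 1): prefix_xor[i] = prefix_xor[i-1] ^ arr[i-1]   (i = j + 1)
  let prefix_xor := (List.range n).foldl
    (fun l j => l.set (j + 1) (PySem.Int.bxor (l.getD j 0) (arr.getD j 0)))
    (List.replicate (n + 1) 0)
  -- for i in range(n + 1): …
  let st := (List.range (n + 1)).foldl
    (fun (st : PySem.Dict Int Int × Int) i =>
      let current_xor := prefix_xor.getD i 0
      if st.1.contains current_xor then
        (st.1, max st.2 ((i : Int) - st.1.getD current_xor 0))
      else
        (st.1.insert current_xor (i : Int), st.2))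
    (PySem.Dict.empty, 0)
  st.2
-- ===== PORT B =====
-- range(1, len(pairs)) over Nat indices is List.range' 1 (len - 1); pairs.sort() on 2-tuples
-- is PySem.List.sorted2 by the two components (Python's lexicographic tuple order);
-- pairs[t] is in range throughout, so getD transcribes it exactly.
def longest_beautiful_subarray_alt (arr : List Int) : Int :=
  let st := arr.foldl
    (fun (s : Int × Int × List (Int × Int)) x =>
      let k := s.2.1 + 1
      let pref := PySem.Int.bxor s.1 x
      (pref, k, s.2.2 ++ [(pref, k)]))
    (0, 0, [(0, 0)])
  let pairs := PySem.List.sorted2 st.2.2 (fun p => p.1) (fun p => p.2) false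
  let st2 := (List.range' 1 (pairs.length - 1)).foldl
    (fun (s : Nat × Int) t =>
      if (pairs.getD t (0, 0)).1 ≠ (pairs.getD s.1 (0, 0)).1 then (t, s.2)
      else (s.1, max s.2 ((pairs.getD t (0, 0)).2 - (pairs.getD s.1 (0, 0)).2)))
    (0, 0)
  st2.2

-- ===== PRECONDITION & SPEC =====
def Spec_longest_beautiful_subarray (arr : List Int) (out : Int) : Prop := out = longest_beautiful_subarray_alt arr
instance (arr : List Int) (out : Int) : Decidable (Spec_longest_beautiful_subarray arr out) := by unfold Spec_longest_beautiful_subarray; infer_instance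

-- ===== CLAIM (what is proved, stated in full; the proofs are below) =====
def Claim_equal_longest_beautiful_subarray : Prop := ∀ (arr : List Int), Dom_longest_beautiful_subarray arr → Spec_longest_beautiful_subarray arr (longest_beautiful_subarray arr)

-- ===== LEMMAS AND PROOFS =====

def pxor (arr : List Int) (k : Nat) : Int := (arr.take k).foldl PySem.Int.bxor 0

theorem pxor_zero (arr : List Int) : pxor arr 0 = 0 := rfl

theorem pxor_succ (arr : List Int) (k : Nat) (hk : k < arr.length) :
    pxor arr (k + 1) = PySem.Int.bxor (pxor arr k) (arr.getD k 0) := by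
  have ht : arr.take (k + 1) = arr.take k ++ [arr[k]] := by
    rw [List.take_add_one, List.getElem?_eq_getElem hk]
    rfl
  have hg : arr.getD k 0 = arr[k] := by
    simp [List.getD_eq_getElem?_getD, List.getElem?_eq_getElem hk]
  unfold pxor
  rw [ht, List.foldl_append, hg]
  rfl

-- A's first loop: after folding range k (k ≤ n) the list equals prefix XORs up to k, zeros after.
theorem buildPrefix_inv (arr : List Int) (k : Nat) (hk : k ≤ arr.length) :
    (List.range k).foldl
      (fun l j => l.set (j + 1) (PySem.Int.bxor (l.getD j 0) (arr.getD j 0)))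
      (List.replicate (arr.length + 1) 0)
    = (List.range (arr.length + 1)).map (fun j => if j ≤ k then pxor arr j else 0) := by
  induction k with
  | zero =>
    apply List.ext_getElem
    · simp
    · intro i h1 h2
      simp only [List.range_zero, List.foldl_nil, List.getElem_replicate,
        List.getElem_map, List.getElem_range]
      by_cases hi : i ≤ 0
      · have : i = 0 := Nat.le_zero.mp hi
        subst this
        simp [pxor_zero]
      · simp [hi]
  | succ k ih =>
    have hk' : k ≤ arr.length := Nat.le_of_succ_le hk
    rw [List.range_succ, List.foldl_append, ih hk']
    simp only [List.foldl_cons, List.foldl_nil]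
    have hlt : k < arr.length + 1 := Nat.lt_succ_of_le hk'
    have hget : ((List.range (arr.length + 1)).map
        (fun j => if j ≤ k then pxor arr j else 0)).getD k 0 = pxor arr k := by
      rw [List.getD_eq_getElem?_getD, List.getElem?_eq_getElem (by simpa using hlt)]
      simp only [Option.getD_some, List.getElem_map, List.getElem_range]
      simp
    rw [hget]
    apply List.ext_getElem
    · simp
    · intro i h1 h2
      simp only [List.length_set, List.length_map, List.length_range] at h1
      rw [List.getElem_set]
      simp only [List.getElem_map, List.getElem_range]
      by_cases hik : k + 1 = i
      · rw [if_pos hik, ← hik]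
        simp [pxor_succ arr k (by omega)]
      · rw [if_neg hik]
        by_cases h3 : i ≤ k
        · simp [h3, Nat.le_succ_of_le h3]
        · have : ¬ i ≤ k + 1 := by omega
          simp [h3, this]

-- A's second-loop step, expressed over pxor, and B's two loop bodies.
def stepA (arr : List Int) (st : PySem.Dict Int Int × Int) (i : Nat) :
    PySem.Dict Int Int × Int :=
  let cx := pxor arr i
  if st.1.contains cx then (st.1, max st.2 ((i : Int) - st.1.getD cx 0))
  else (st.1.insert cx (i : Int), st.2)

theorem A_eq (arr : List Int) :
    longest_beautiful_subarray arr
      = ((List.range (arr.length + 1)).foldl (stepA arr) (PySem.Dict.empty, 0)).2 := by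
  unfold longest_beautiful_subarray
  simp only []
  rw [buildPrefix_inv arr arr.length le_rfl]
  congr 1
  apply PySem.List.foldl_congr_mem
  intro st i hi
  have hi' : i < arr.length + 1 := List.mem_range.mp hi
  have hget : ((List.range (arr.length + 1)).map
      (fun j => if j ≤ arr.length then pxor arr j else 0)).getD i 0 = pxor arr i := by
    rw [List.getD_eq_getElem?_getD, List.getElem?_eq_getElem (by simpa using hi')]
    simp
    omega
  simp only [stepA, hget]

def IsBest (arr : List Int) (K : Nat) (m : Int) : Prop :=
  0 ≤ m ∧
  (∀ p q : Nat, p < q → q < K → pxor arr p = pxor arr q → (q : Int) - p ≤ m) ∧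
  (m = 0 ∨ ∃ p q : Nat, p < q ∧ q < K ∧ pxor arr p = pxor arr q ∧ m = (q : Int) - p)

theorem isBest_unique {arr : List Int} {K : Nat} {m m' : Int}
    (h : IsBest arr K m) (h' : IsBest arr K m') : m = m' := by
  obtain ⟨h0, hub, hw⟩ := h
  obtain ⟨h0', hub', hw'⟩ := h'
  apply le_antisymm
  · rcases hw with rfl | ⟨p, q, hpq, hqK, he, rfl⟩
    · exact h0'
    · exact hub' p q hpq hqK he
  · rcases hw' with rfl | ⟨p, q, hpq, hqK, he, rfl⟩
    · exact h0
    · exact hub p q hpq hqK he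

-- ---- A side: dict invariant ----
def InvA (arr : List Int) (k : Nat) (st : PySem.Dict Int Int × Int) : Prop :=
  (∀ v : Int, st.1.contains v = true ↔ ∃ i, i < k ∧ pxor arr i = v) ∧
  (∀ v : Int, st.1.contains v = true →
    ∃ j, j < k ∧ pxor arr j = v ∧ st.1.getD v 0 = (j : Int) ∧ ∀ i, i < j → pxor arr i ≠ v) ∧
  IsBest arr k st.2

theorem invA_step (arr : List Int) (k : Nat) (st : PySem.Dict Int Int × Int)
    (h : InvA arr k st) : InvA arr (k + 1) (stepA arr st k) := by
  obtain ⟨hc, hg, h0, hub, hw⟩ := h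
  unfold stepA
  simp only []
  by_cases hmem : st.1.contains (pxor arr k) = true
  · rw [if_pos hmem]
    obtain ⟨j, hjk, hje, hjg, hjmin⟩ := hg _ hmem
    refine ⟨?_, ?_, ?_, ?_, ?_⟩
    · intro v
      rw [hc v]
      constructor
      · rintro ⟨i, hi, he⟩; exact ⟨i, by omega, he⟩
      · rintro ⟨i, hi, he⟩
        by_cases hik : i < k
        · exact ⟨i, hik, he⟩
        · have : i = k := by omega
          subst this
          exact ⟨j, hjk, he ▸ hje⟩
    · intro v hv
      obtain ⟨j', hj', hje', hjg', hjmin'⟩ := hg v hv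
      exact ⟨j', by omega, hje', hjg', hjmin'⟩
    · exact le_trans h0 (le_max_left _ _)
    · intro p q hpq hqk he
      by_cases hq : q < k
      · exact le_trans (hub p q hpq hq he) (le_max_left _ _)
      · have hq' : q = k := by omega
        subst hq'
        -- minimality of j: j ≤ p
        have hjp : j ≤ p := by
          by_contra hcon
          exact hjmin p (by omega) he
        rw [hjg]
        calc (q : Int) - p ≤ (q : Int) - j := by omega
          _ ≤ max st.2 ((q : Int) - j) := le_max_right _ _
    · rcases le_total ((k : Int) - st.1.getD (pxor arr k) 0) st.2 with hle | hle
      · rw [max_eq_left hle]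
        rcases hw with h0' | ⟨p, q, hpq, hqk, he, hrest⟩
        · exact Or.inl h0'
        · exact Or.inr ⟨p, q, hpq, by omega, he, hrest⟩
      · rw [max_eq_right hle, hjg]
        exact Or.inr ⟨j, k, hjk, by omega, hje, rfl⟩
  · rw [if_neg hmem]
    have hnot : ∀ i, i < k → pxor arr i ≠ pxor arr k := by
      intro i hi he
      exact absurd ((hc _).mpr ⟨i, hi, he⟩) (by simpa using hmem)
    refine ⟨?_, ?_, ?_, ?_, ?_⟩
    · intro v
      rw [PySem.Dict.contains_insert]
      constructor
      · intro hv
        rcases Bool.or_eq_true_iff.mp hv with hv | hv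
        · have : v = pxor arr k := by simpa using hv
          exact ⟨k, by omega, this.symm⟩
        · obtain ⟨i, hi, he⟩ := (hc v).mp hv
          exact ⟨i, by omega, he⟩
      · rintro ⟨i, hi, he⟩
        by_cases hik : i < k
        · exact Bool.or_eq_true_iff.mpr (Or.inr ((hc v).mpr ⟨i, hik, he⟩))
        · have : i = k := by omega
          subst this
          exact Bool.or_eq_true_iff.mpr (Or.inl (by simp [he]))
    · intro v hv
      by_cases hvk : v = pxor arr k
      · subst hvk
        refine ⟨k, by omega, rfl, ?_, fun i hi => hnot i hi⟩
        rw [PySem.Dict.getD_insert_self]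
      · obtain ⟨j', hj', hje', hjg', hjmin'⟩ := hg v (by
          have := (PySem.Dict.contains_insert (d := st.1) (k := pxor arr k)
            (v := (k : Int)) (k' := v)) ▸ hv
          rcases Bool.or_eq_true_iff.mp this with h' | h'
          · exact absurd (by simpa using h') hvk
          · exact h')
        refine ⟨j', by omega, hje', ?_, hjmin'⟩
        simpa [PySem.Dict.getD_insert, hvk] using hjg'
    · exact h0
    · intro p q hpq hqk he
      by_cases hq : q < k
      · exact hub p q hpq hq he
      · have : q = k := by omega
        subst this
        exact absurd he (hnot p hpq)
    · rcases hw with h0' | ⟨p, q, hpq, hqk, he, hrest⟩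
      · exact Or.inl h0'
      · exact Or.inr ⟨p, q, hpq, by omega, he, hrest⟩

theorem invA_fold (arr : List Int) (K : Nat) :
    InvA arr K ((List.range K).foldl (stepA arr) (PySem.Dict.empty, 0)) := by
  induction K with
  | zero =>
    refine ⟨?_, ?_, le_refl 0, ?_, Or.inl rfl⟩
    · intro v; simp [PySem.Dict.contains_empty]
    · intro v hv; simp [PySem.Dict.contains_empty] at hv
    · intro p q _ hq _; omega
  | succ K ih =>
    rw [List.range_succ, List.foldl_append, List.foldl_cons, List.foldl_nil]
    exact invA_step arr K _ ih

-- ---- B side: nested-scan invariants ----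
-- ---- B side: sort-and-scan ----
-- Python's lexicographic ordering of the (value, index) pairs.
def lexLe (a b : Int × Int) : Prop := a.1 < b.1 ∨ (a.1 = b.1 ∧ a.2 ≤ b.2)

def buildStep (s : Int × Int × List (Int × Int)) (x : Int) : Int × Int × List (Int × Int) :=
  let k := s.2.1 + 1
  let pref := PySem.Int.bxor s.1 x
  (pref, k, s.2.2 ++ [(pref, k)])

def stepScan (S : List (Int × Int)) (s : Nat × Int) (t : Nat) : Nat × Int :=
  if (S.getD t (0, 0)).1 ≠ (S.getD s.1 (0, 0)).1 then (t, s.2)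
  else (s.1, max s.2 ((S.getD t (0, 0)).2 - (S.getD s.1 (0, 0)).2))

def pairsS (arr : List Int) : List (Int × Int) :=
  PySem.List.sorted2 ((arr.foldl buildStep (0, 0, [(0, 0)])).2.2) (fun p => p.1) (fun p => p.2) false

theorem alt_eq (arr : List Int) :
    longest_beautiful_subarray_alt arr
      = ((List.range' 1 ((pairsS arr).length - 1)).foldl (stepScan (pairsS arr)) (0, 0)).2 := rfl

-- sorting 2-tuples of Ints is sorting by the lexicographic (toLex) key
theorem sorted2_eq_sorted_lex (xs : List (Int × Int)) :
    PySem.List.sorted2 xs (fun p => p.1) (fun p => p.2) false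
      = PySem.List.sorted xs (fun p => toLex p) false := by
  unfold PySem.List.sorted2 PySem.List.sorted
  simp only [if_neg (by decide : ¬ (false = true))]
  congr 1
  funext acc x
  congr 1
  funext a b
  by_cases h1 : a.1 < b.1
  · simp [h1, Prod.Lex.lt_iff]
  · by_cases h2 : b.1 < a.1
    · simp [h1, h2, Prod.Lex.lt_iff]
      omega
    · have he : a.1 = b.1 := le_antisymm (not_lt.mp h2) (not_lt.mp h1)
      simp [Prod.Lex.lt_iff, he]

-- the unsorted pair list is exactly [(pxor k, k) : k = 0..n]
theorem build_snd : ∀ (l : List Int) (pref k : Int) (acc : List (Int × Int)),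
    (l.foldl buildStep (pref, k, acc)).2.2
      = acc ++ (List.range l.length).map
          (fun j => ((l.take (j + 1)).foldl PySem.Int.bxor pref, k + 1 + (j : Int))) := by
  intro l
  induction l with
  | nil => intro pref k acc; simp
  | cons x t ih =>
    intro pref k acc
    rw [List.foldl_cons]
    show (t.foldl buildStep (PySem.Int.bxor pref x, k + 1, acc ++ [(PySem.Int.bxor pref x, k + 1)])).2.2 = _
    rw [ih]
    rw [List.length_cons, List.range_succ_eq_map, List.map_cons, List.map_map]
    simp only [List.take_succ_cons, List.take_zero, List.foldl_cons, List.foldl_nil,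
      Nat.cast_zero, List.append_assoc, List.singleton_append]
    congr 2
    · ring_nf
    · apply List.map_congr_left
      intro j _
      simp only [Function.comp_apply]
      refine congrArg₂ Prod.mk rfl ?_
      push_cast
      ring

theorem pairsL_eq (arr : List Int) :
    (arr.foldl buildStep (0, 0, [(0, 0)])).2.2
      = (List.range (arr.length + 1)).map (fun k => (pxor arr k, (k : Int))) := by
  rw [build_snd]
  rw [List.range_succ_eq_map, List.map_cons, List.map_map]
  simp only [pxor_zero, Nat.cast_zero, List.singleton_append]
  congr 1
  apply List.map_congr_left
  intro j _
  simp only [Function.comp_apply, pxor]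
  refine congrArg₂ Prod.mk rfl ?_
  push_cast
  ring

theorem pairsS_pairwise (arr : List Int) : (pairsS arr).Pairwise lexLe := by
  unfold pairsS
  rw [sorted2_eq_sorted_lex]
  have h := PySem.List.sorted_pairwise ((arr.foldl buildStep (0, 0, [(0, 0)])).2.2)
    (fun p : Int × Int => toLex p)
  refine h.imp ?_
  intro a b hab
  have := (Prod.Lex.le_iff (α := Int) (β := Int)).mp hab
  simpa [lexLe] using this

theorem pairsS_perm (arr : List Int) :
    (pairsS arr).Perm ((List.range (arr.length + 1)).map (fun k => (pxor arr k, (k : Int)))) := by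
  unfold pairsS
  rw [← pairsL_eq]
  exact PySem.List.sorted2_perm _ _ _ _

theorem pairsS_length (arr : List Int) : (pairsS arr).length = arr.length + 1 := by
  rw [(pairsS_perm arr).length_eq]
  simp

theorem pairsS_nodup (arr : List Int) : (pairsS arr).Nodup := by
  rw [(pairsS_perm arr).nodup_iff]
  apply List.Nodup.map _ (List.nodup_range)
  intro a b hab
  have : ((a : Int)) = (b : Int) := congrArg Prod.snd hab
  exact_mod_cast this

theorem pairsS_mem (arr : List Int) (p : Int × Int) :
    p ∈ pairsS arr ↔ ∃ k, k ≤ arr.length ∧ p = (pxor arr k, (k : Int)) := by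
  rw [(pairsS_perm arr).mem_iff, List.mem_map]
  constructor
  · rintro ⟨k, hk, rfl⟩
    exact ⟨k, by simpa using List.mem_range.mp hk, rfl⟩
  · rintro ⟨k, hk, rfl⟩
    exact ⟨k, List.mem_range.mpr (by omega), rfl⟩

theorem pairsS_getD (arr : List Int) (t : Nat) (ht : t < (pairsS arr).length) :
    (pairsS arr).getD t (0, 0) = (pairsS arr)[t] := by
  rw [List.getD_eq_getElem?_getD, List.getElem?_eq_getElem ht, Option.getD_some]

theorem pairsS_mono (arr : List Int) (a b : Nat) (hab : a < b) (hb : b < (pairsS arr).length) :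
    lexLe ((pairsS arr).getD a (0, 0)) ((pairsS arr).getD b (0, 0)) := by
  rw [pairsS_getD arr a (by omega), pairsS_getD arr b hb]
  exact List.pairwise_iff_getElem.mp (pairsS_pairwise arr) a b (by omega) hb hab

-- The scan over range(t, m) of the sorted list, carrying the run-start index rs:
-- rs is the least position holding the value of position t-1, and best is the running
-- maximum of all index gaps within equal-value runs seen so far.
theorem scan_inv (S : List (Int × Int))
    (hmono : ∀ a b : Nat, a < b → b < S.length →
      lexLe (S.getD a (0, 0)) (S.getD b (0, 0))) :
    ∀ (len t rs : Nat) (best : Int), 1 ≤ t → t + len = S.length → rs < t →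
    (S.getD rs (0, 0)).1 = (S.getD (t - 1) (0, 0)).1 →
    (∀ u, u < t → (S.getD u (0, 0)).1 = (S.getD (t - 1) (0, 0)).1 → rs ≤ u) →
    0 ≤ best →
    (∀ a b : Nat, a < b → b < t → (S.getD a (0, 0)).1 = (S.getD b (0, 0)).1 →
      (S.getD b (0, 0)).2 - (S.getD a (0, 0)).2 ≤ best) →
    (best = 0 ∨ ∃ a b : Nat, a < b ∧ b < S.length ∧
      (S.getD a (0, 0)).1 = (S.getD b (0, 0)).1 ∧
      best = (S.getD b (0, 0)).2 - (S.getD a (0, 0)).2) →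
    (0 ≤ ((List.range' t len).foldl (stepScan S) (rs, best)).2 ∧
     (∀ a b : Nat, a < b → b < S.length → (S.getD a (0, 0)).1 = (S.getD b (0, 0)).1 →
       (S.getD b (0, 0)).2 - (S.getD a (0, 0)).2
         ≤ ((List.range' t len).foldl (stepScan S) (rs, best)).2) ∧
     (((List.range' t len).foldl (stepScan S) (rs, best)).2 = 0 ∨
       ∃ a b : Nat, a < b ∧ b < S.length ∧
         (S.getD a (0, 0)).1 = (S.getD b (0, 0)).1 ∧
         ((List.range' t len).foldl (stepScan S) (rs, best)).2
           = (S.getD b (0, 0)).2 - (S.getD a (0, 0)).2)) := by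
  have hfst : ∀ a b : Nat, a ≤ b → b < S.length →
      (S.getD a (0, 0)).1 ≤ (S.getD b (0, 0)).1 := by
    intro a b hab hb
    rcases Nat.lt_or_ge a b with h | h
    · rcases hmono a b h hb with h' | ⟨h', _⟩
      · exact le_of_lt h'
      · exact le_of_eq h'
    · have : a = b := by omega
      subst this; exact le_refl _
  intro len
  induction len with
  | zero =>
    intro t rs best h1t hlen hrs h2 h3 h4 h5 h6
    refine ⟨h4, ?_, h6⟩
    intro a b hab hb he
    exact h5 a b hab (by omega) he
  | succ len ih =>
    intro t rs best h1t hlen hrs h2 h3 h4 h5 h6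
    have htS : t < S.length := by omega
    rw [List.range'_succ, List.foldl_cons]
    have hstep : stepScan S (rs, best) t
        = if (S.getD t (0, 0)).1 ≠ (S.getD rs (0, 0)).1 then (t, best)
          else (rs, max best ((S.getD t (0, 0)).2 - (S.getD rs (0, 0)).2)) := rfl
    rw [hstep]
    by_cases hc : (S.getD t (0, 0)).1 ≠ (S.getD rs (0, 0)).1
    · rw [if_pos hc]
      -- a fresh value starts at t: no earlier position shares it
      have habs : ∀ a, a < t → (S.getD a (0, 0)).1 ≠ (S.getD t (0, 0)).1 := by
        intro a ha he
        have hl1 : (S.getD a (0, 0)).1 ≤ (S.getD (t - 1) (0, 0)).1 :=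
          hfst a (t - 1) (by omega) (by omega)
        have hl2 : (S.getD (t - 1) (0, 0)).1 ≤ (S.getD t (0, 0)).1 :=
          hfst (t - 1) t (by omega) htS
        have he1 : (S.getD (t - 1) (0, 0)).1 = (S.getD t (0, 0)).1 := by
          rw [he] at hl1; omega
        exact hc (by rw [← he1, ← h2])
      refine ih (t + 1) t best (by omega) (by omega) (by omega) ?_ ?_ h4 ?_ h6
      · simp
      · intro u hu he
        rcases Nat.lt_or_ge u t with h | h
        · exact absurd (by simpa using he) (habs u h)
        · omega
      · intro a b hab hb he
        rcases Nat.lt_or_ge b t with h | h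
        · exact h5 a b hab h he
        · have : b = t := by omega
          subst this
          exact absurd (he ▸ rfl) (habs a hab)
    · rw [if_neg hc]
      have hceq : (S.getD t (0, 0)).1 = (S.getD rs (0, 0)).1 := not_ne_iff.mp hc
      -- every earlier member of the run lies at or after rs, hence has snd ≥ snd rs
      have hrun : ∀ a, a < t → (S.getD a (0, 0)).1 = (S.getD t (0, 0)).1 → rs ≤ a := by
        intro a ha he
        exact h3 a ha (by rw [he, hceq, h2])
      have hsnd : ∀ a, rs ≤ a → a < t → (S.getD a (0, 0)).1 = (S.getD t (0, 0)).1 →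
          (S.getD rs (0, 0)).2 ≤ (S.getD a (0, 0)).2 := by
        intro a hrsa ha he
        rcases Nat.lt_or_ge rs a with h | h
        · rcases hmono rs a h (by omega) with h' | ⟨_, h'⟩
          · rw [he, hceq] at h'
            exact absurd h' (lt_irrefl _)
          · exact h'
        · have : rs = a := by omega
          subst this; exact le_refl _
      refine ih (t + 1) rs (max best ((S.getD t (0, 0)).2 - (S.getD rs (0, 0)).2))
        (by omega) (by omega) (by omega) ?_ ?_ (le_trans h4 (le_max_left _ _)) ?_ ?_
      · simpa using hceq.symm
      · intro u hu he
        simp only [Nat.add_sub_cancel] at he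
        rcases Nat.lt_or_ge u t with h | h
        · exact hrun u h he
        · omega
      · intro a b hab hb he
        rcases Nat.lt_or_ge b t with h | h
        · exact le_trans (h5 a b hab h he) (le_max_left _ _)
        · have : b = t := by omega
          subst this
          have hrsa := hrun a hab he
          have hge := hsnd a hrsa hab he
          have hgap : (S.getD b (0, 0)).2 - (S.getD a (0, 0)).2
              ≤ (S.getD b (0, 0)).2 - (S.getD rs (0, 0)).2 := by omega
          exact le_trans hgap (le_max_right _ _)
      · rcases le_total best ((S.getD t (0, 0)).2 - (S.getD rs (0, 0)).2) with hle | hle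
        · rw [max_eq_right hle]
          exact Or.inr ⟨rs, t, hrs, htS, hceq.symm, rfl⟩
        · rw [max_eq_left hle]
          exact h6

-- B's result is IsBest arr (n + 1).
theorem B_isBest (arr : List Int) :
    IsBest arr (arr.length + 1) (longest_beautiful_subarray_alt arr) := by
  rw [alt_eq]
  have hmono := pairsS_mono arr
  have hlen := pairsS_length arr
  have hscan := scan_inv (pairsS arr) hmono ((pairsS arr).length - 1) 1 0 0 (le_refl 1)
    (by omega) (by omega)
    rfl (by intro u hu _; omega) (le_refl 0)
    (by intro a b hab hb _; omega)
    (Or.inl rfl)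
  obtain ⟨r0, rub, rw⟩ := hscan
  refine ⟨r0, ?_, ?_⟩
  · -- every equal-prefix pair is bounded by the scan result
    intro p q hpq hqK he
    have hpmem : (pxor arr p, (p : Int)) ∈ pairsS arr :=
      (pairsS_mem arr _).mpr ⟨p, by omega, rfl⟩
    have hqmem : (pxor arr q, (q : Int)) ∈ pairsS arr :=
      (pairsS_mem arr _).mpr ⟨q, by omega, rfl⟩
    obtain ⟨a, ha, hae⟩ := List.mem_iff_getElem.mp hpmem
    obtain ⟨b, hb, hbe⟩ := List.mem_iff_getElem.mp hqmem
    have haD : (pairsS arr).getD a (0, 0) = (pxor arr p, (p : Int)) := by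
      rw [pairsS_getD arr a ha]; exact hae
    have hbD : (pairsS arr).getD b (0, 0) = (pxor arr q, (q : Int)) := by
      rw [pairsS_getD arr b hb]; exact hbe
    have hab : a < b := by
      rcases Nat.lt_trichotomy a b with h | h | h
      · exact h
      · exfalso
        subst h
        have hpair := haD.symm.trans hbD
        have hsnd : ((p : Nat) : Int) = (q : Int) := congrArg Prod.snd hpair
        omega
      · exfalso
        have hlex := hmono b a h ha
        rw [haD, hbD] at hlex
        rcases hlex with h' | ⟨_, h'⟩
        · simp only at h'
          rw [he] at h'
          exact absurd h' (lt_irrefl _)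
        · simp only at h'
          omega
    have hub := rub a b hab hb (by rw [haD, hbD]; exact he)
    rw [haD, hbD] at hub
    simpa using hub
  · -- the scan result is 0 or an actual equal-prefix gap
    rcases rw with h0 | ⟨a, b, hab, hb, he, hval⟩
    · exact Or.inl h0
    · right
      have haS : (pairsS arr).getD a (0, 0) ∈ pairsS arr := by
        rw [pairsS_getD arr a (by omega)]
        exact List.getElem_mem _
      have hbS : (pairsS arr).getD b (0, 0) ∈ pairsS arr := by
        rw [pairsS_getD arr b hb]
        exact List.getElem_mem _
      obtain ⟨p, hp, hpe⟩ := (pairsS_mem arr _).mp haS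
      obtain ⟨q, hq, hqe⟩ := (pairsS_mem arr _).mp hbS
      have hne : (pairsS arr).getD a (0, 0) ≠ (pairsS arr).getD b (0, 0) := by
        rw [pairsS_getD arr a (by omega), pairsS_getD arr b hb]
        intro hcon
        exact absurd ((List.Nodup.getElem_inj_iff (pairsS_nodup arr)).mp hcon) (by omega)
      have hpq : p ≠ q := by
        intro hcon
        subst hcon
        exact hne (hpe.trans hqe.symm)
      have hple : (p : Int) ≤ (q : Int) := by
        rcases hmono a b hab hb with h' | ⟨_, h'⟩
        · exfalso
          rw [hpe, hqe] at he
          simp only at he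
          rw [hpe, hqe] at h'
          simp only at h'
          rw [he] at h'
          exact absurd h' (lt_irrefl _)
        · rw [hpe, hqe] at h'
          simpa using h'
      have hplt : p < q := by omega
      refine ⟨p, q, hplt, by omega, ?_, ?_⟩
      · rw [hpe, hqe] at he
        simpa using he
      · rw [hpe, hqe] at hval
        simpa using hval

-- ===== VERDICT (by name: the statement is the Claim_ definition above) =====
theorem longest_beautiful_subarray_spec : Claim_equal_longest_beautiful_subarray := by
  intro arr _
  unfold Spec_longest_beautiful_subarray
  rw [A_eq]
  have hA : IsBest arr (arr.length + 1)
      ((List.range (arr.length + 1)).foldl (stepA arr) (PySem.Dict.empty, 0)).2 :=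
    (invA_fold arr (arr.length + 1)).2.2
  exact isBest_unique hA (B_isBest arr)
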